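-- pv_equiv track=rewrite | github.com/mincheol-shin/HackerRank_solutions | Algorithms/02. Implementation/Breaking the Records/solution.py | breakingRecords
-- ===== SOURCE A (Python) =====
-- def breakingRecords(scores):
--     result = {"max" : 0, "min" : 0}
--     max = min = scores[0]
--     for i in range(1, len(scores)):
--         if scores[i] > max:
--             max = scores[i]
--             result["max"] += 1
--         elif scores[i] < min:
--             min = scores[i]
--             result["min"] += 1
--
--     return  result
-- ===== SOURCE B (Python) =====
-- def breakingRecords(scores):
--     cur_max = cur_min = scores[0]
--     run_max, run_min = [], []
--     for s in scores:
--         cur_max = s if s > cur_max else cur_max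
--         cur_min = s if s < cur_min else cur_min
--         run_max.append(cur_max)
--         run_min.append(cur_min)
--     max_breaks = sum(1 for prev, cur in zip(run_max, run_max[1:]) if cur > prev)
--     min_breaks = sum(1 for prev, cur in zip(run_min, run_min[1:]) if cur < prev)
--     return {"max": max_breaks, "min": min_breaks}
-- ===== Notes on version B (the rewrite author's own statement) =====
-- stated objective: alternative
-- what changed: Replaces A's single interleaved record-tracking loop (one mutable dict, max/min and counters updated together under if/elif) by a build-then-count structure: one pass builds the prefix running-max and running-min tables, then two separate zip-adjacent passes count strict increases of the running max and strict decreases of the running min.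
import Mathlib
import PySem

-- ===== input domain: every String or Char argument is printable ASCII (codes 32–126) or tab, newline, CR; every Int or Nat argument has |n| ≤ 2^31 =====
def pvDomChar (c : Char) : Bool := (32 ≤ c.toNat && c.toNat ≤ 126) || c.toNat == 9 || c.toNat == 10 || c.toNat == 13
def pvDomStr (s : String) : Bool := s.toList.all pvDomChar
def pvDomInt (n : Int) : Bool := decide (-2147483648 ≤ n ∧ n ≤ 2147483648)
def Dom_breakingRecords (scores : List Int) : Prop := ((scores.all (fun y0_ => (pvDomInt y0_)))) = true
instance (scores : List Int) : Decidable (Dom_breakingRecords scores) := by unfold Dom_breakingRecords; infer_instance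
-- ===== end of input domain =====

-- B replaces A's single interleaved record-tracking loop by building the running-max/min prefix tables
-- first and then counting adjacent record breaks in two separate passes (alternative decomposition, same cost).


-- ===== PORT A =====
-- A: result = {"max":0,"min":0}; max = min = scores[0]; for i in range(1, len(scores)):
--    if scores[i] > max: max = scores[i]; result["max"] += 1  elif scores[i] < min: min = scores[i]; result["min"] += 1
def breakingRecords (scores : List Int) : List (String × Int) :=
  match scores with
  | [] => []   -- Python raises IndexError reading the first element; excluded by Pre_breakingRecords
  | s0 :: _ =>
    let result : PySem.Dict String Int := PySem.Dict.mk [("max", 0), ("min", 0)]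
    let st := (PySem.List.pyRange 1 (PySem.List.len scores)).foldl
      (fun (st : PySem.Dict String Int × Int × Int) i =>
        let v := PySem.List.pyGetD scores i 0      -- i ∈ range(1, len) is always in range
        if v > st.2.1 then (st.1.modify "max" 0 (· + 1), v, st.2.2)
        else if v < st.2.2 then (st.1.modify "min" 0 (· + 1), st.2.1, v)
        else st)
      (result, s0, s0)
    st.1.items

-- ===== PORT B =====
-- B: one pass builds run_max / run_min prefix tables, then two zip-adjacent passes count the breaks.
def breakingRecords_alt (scores : List Int) : List (String × Int) :=
  match scores with
  | [] => []   -- Python raises IndexError reading the first element; excluded by Pre_breakingRecords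
  | s0 :: _ =>
    let st := scores.foldl
      (fun (st : Int × Int × List Int × List Int) s =>
        let cm := if s > st.1 then s else st.1
        let cn := if s < st.2.1 then s else st.2.1
        (cm, cn, st.2.2.1 ++ [cm], st.2.2.2 ++ [cn]))
      (s0, s0, [], [])
    let runMax := st.2.2.1
    let runMin := st.2.2.2
    let maxBreaks := (runMax.zip (runMax.drop 1)).foldl (fun c p => if p.2 > p.1 then c + 1 else c) (0 : Int)
    let minBreaks := (runMin.zip (runMin.drop 1)).foldl (fun c p => if p.2 < p.1 then c + 1 else c) (0 : Int)
    [("max", maxBreaks), ("min", minBreaks)]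

-- ===== PRECONDITION & SPEC =====
-- Pre_ excludes only the empty list, on which A (and B) raise IndexError reading the first element.
def Pre_breakingRecords (scores : List Int) : Prop := scores ≠ []
instance (scores : List Int) : Decidable (Pre_breakingRecords scores) := by unfold Pre_breakingRecords; infer_instance
def pvWitness_breakingRecords : List Int := [3, 1, 4]

def Spec_breakingRecords (scores : List Int) (out : List (String × Int)) : Prop := out = breakingRecords_alt scores
instance (scores : List Int) (out : List (String × Int)) : Decidable (Spec_breakingRecords scores out) := by unfold Spec_breakingRecords; infer_instance

-- ===== CLAIM (what is proved, stated in full; the proofs are below) =====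
def Claim_equal_breakingRecords : Prop := ∀ (scores : List Int), Dom_breakingRecords scores → Pre_breakingRecords scores → Spec_breakingRecords scores (breakingRecords scores)

-- ===== LEMMAS AND PROOFS =====

-- Number of max-record breaks over the remaining scores, given the current record mx.
def cntMax (mx : Int) : List Int → Int
  | [] => 0
  | s :: r => (if s > mx then 1 else 0) + cntMax (if s > mx then s else mx) r

def cntMin (mn : Int) : List Int → Int
  | [] => 0
  | s :: r => (if s < mn then 1 else 0) + cntMin (if s < mn then s else mn) r

-- Running-max / running-min prefix sequences.
def scanMax (mx : Int) : List Int → List Int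
  | [] => []
  | s :: r => let m := if s > mx then s else mx; m :: scanMax m r

def scanMin (mn : Int) : List Int → List Int
  | [] => []
  | s :: r => let m := if s < mn then s else mn; m :: scanMin m r

-- A's literal-dict "+= 1" updates compute on the two-key dict shape.
theorem dict_modify_max (a b : Int) (f : Int → Int) :
    (PySem.Dict.mk [("max", a), ("min", b)]).modify "max" 0 f
      = PySem.Dict.mk [("max", f a), ("min", b)] := by
  simp [PySem.Dict.modify, PySem.Dict.insert, PySem.Dict.get?, PySem.Dict.getD, PySem.Dict.contains]

theorem dict_modify_min (a b : Int) (f : Int → Int) :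
    (PySem.Dict.mk [("max", a), ("min", b)]).modify "min" 0 f
      = PySem.Dict.mk [("max", a), ("min", f b)] := by
  simp [PySem.Dict.modify, PySem.Dict.insert, PySem.Dict.get?, PySem.Dict.getD, PySem.Dict.contains]

-- A's loop yields exactly the cntMax / cntMin counts (invariant: mn ≤ mx).
theorem lemA (rest : List Int) : ∀ (mx mn a b : Int), mn ≤ mx →
    (rest.foldl
      (fun (st : PySem.Dict String Int × Int × Int) v =>
        if v > st.2.1 then (st.1.modify "max" 0 (· + 1), v, st.2.2)
        else if v < st.2.2 then (st.1.modify "min" 0 (· + 1), st.2.1, v)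
        else st)
      (PySem.Dict.mk [("max", a), ("min", b)], mx, mn)).1
    = PySem.Dict.mk [("max", a + cntMax mx rest), ("min", b + cntMin mn rest)] := by
  induction rest with
  | nil => intro mx mn a b _; simp [cntMax, cntMin]
  | cons s r ih =>
    intro mx mn a b hle
    by_cases h1 : s > mx
    · have h2 : ¬ s < mn := by omega
      rw [List.foldl_cons]
      simp only [if_pos h1, dict_modify_max]
      rw [ih s mn (a + 1) b (by omega)]
      simp only [cntMax, cntMin, if_pos h1, if_neg h2]
      have e1 : a + (1 + cntMax s r) = a + 1 + cntMax s r := by ring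
      have e2 : b + (0 + cntMin mn r) = b + cntMin mn r := by ring
      rw [e1, e2]
    · by_cases h2 : s < mn
      · rw [List.foldl_cons]
        simp only [if_neg h1, if_pos h2, dict_modify_min]
        rw [ih mx s a (b + 1) (by omega)]
        simp only [cntMax, cntMin, if_neg h1, if_pos h2]
        have e1 : a + (0 + cntMax mx r) = a + cntMax mx r := by ring
        have e2 : b + (1 + cntMin s r) = b + 1 + cntMin s r := by ring
        rw [e1, e2]
      · rw [List.foldl_cons]
        simp only [if_neg h1, if_neg h2]
        rw [ih mx mn a b hle]
        simp only [cntMax, cntMin, if_neg h1, if_neg h2]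
        have e1 : a + (0 + cntMax mx r) = a + cntMax mx r := by ring
        have e2 : b + (0 + cntMin mn r) = b + cntMin mn r := by ring
        rw [e1, e2]

-- B's table-building fold appends the scan sequences (only the list components are used later).
theorem lemScan (xs : List Int) : ∀ (cm cn : Int) (lM lN : List Int),
    (xs.foldl
      (fun (st : Int × Int × List Int × List Int) s =>
        let c1 := if s > st.1 then s else st.1
        let c2 := if s < st.2.1 then s else st.2.1
        (c1, c2, st.2.2.1 ++ [c1], st.2.2.2 ++ [c2]))
      (cm, cn, lM, lN)).2.2
    = (lM ++ scanMax cm xs, lN ++ scanMin cn xs) := by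
  induction xs with
  | nil => intro cm cn lM lN; simp [scanMax, scanMin]
  | cons s r ih =>
    intro cm cn lM lN
    rw [List.foldl_cons]
    simp only []
    rw [ih]
    simp [scanMax, scanMin, List.append_assoc]

-- Counting adjacent strict increases along m :: scanMax m xs equals cntMax m xs.
theorem lemZipMax (xs : List Int) : ∀ (m c : Int),
    ((m :: scanMax m xs).zip (scanMax m xs)).foldl
        (fun c p => if p.2 > p.1 then c + 1 else c) c
    = c + cntMax m xs := by
  induction xs with
  | nil => intro m c; simp [scanMax, cntMax]
  | cons s r ih =>
    intro m c
    simp only [scanMax, cntMax, List.zip_cons_cons, List.foldl_cons]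
    by_cases h : s > m
    · simp only [if_pos h]
      rw [ih s (c + 1)]
      ring
    · simp only [if_neg h]
      rw [if_neg (by omega : ¬ m > m), ih m c]
      ring

theorem lemZipMin (xs : List Int) : ∀ (m c : Int),
    ((m :: scanMin m xs).zip (scanMin m xs)).foldl
        (fun c p => if p.2 < p.1 then c + 1 else c) c
    = c + cntMin m xs := by
  induction xs with
  | nil => intro m c; simp [scanMin, cntMin]
  | cons s r ih =>
    intro m c
    simp only [scanMin, cntMin, List.zip_cons_cons, List.foldl_cons]
    by_cases h : s < m
    · simp only [if_pos h]
      rw [ih s (c + 1)]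
      ring
    · simp only [if_neg h]
      rw [if_neg (by omega : ¬ m < m), ih m c]
      ring

-- ===== VERDICT (by name: the statement is the Claim_ definition above) =====
theorem breakingRecords_spec : Claim_equal_breakingRecords := by
  intro scores _ hpre
  unfold Spec_breakingRecords
  match scores, hpre with
  | s0 :: t, _ =>
    unfold breakingRecords breakingRecords_alt
    simp only []
    -- A side: index loop → fold over the tail
    rw [PySem.List.foldl_pyRange_pyGetD (s0 :: t) 0
      (fun (st : PySem.Dict String Int × Int × Int) v =>
        if v > st.2.1 then (st.1.modify "max" 0 (· + 1), v, st.2.2)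
        else if v < st.2.2 then (st.1.modify "min" 0 (· + 1), st.2.1, v)
        else st)
      (PySem.Dict.mk [("max", 0), ("min", 0)], s0, s0) (by norm_num)]
    simp only [Int.toNat_one, List.drop_succ_cons, List.drop_zero]
    rw [lemA t s0 s0 0 0 le_rfl]
    -- B side: the tables are the scan sequences
    rw [lemScan (s0 :: t) s0 s0 [] []]
    simp only [List.nil_append]
    have hsc : scanMax s0 (s0 :: t) = s0 :: scanMax s0 t := by
      simp [scanMax]
    have hsn : scanMin s0 (s0 :: t) = s0 :: scanMin s0 t := by
      simp [scanMin]
    rw [hsc, hsn]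
    simp only [List.drop_succ_cons, List.drop_zero]
    rw [lemZipMax t s0 0, lemZipMin t s0 0]
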